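-- pv_equiv track=rewrite | github.com/OwenZZing/hellomymouse | backend/parser/section_splitter.py | get_key_sections
-- ===== SOURCE A (Python) =====
-- def get_key_sections(sections: dict[str, str], max_chars: int = 8000) -> str:
--     """
--     Extract the most relevant sections for hypothesis generation:
--     methods, results, discussion, limitations, future work, conclusion.
--     Concatenated and truncated to max_chars total.
--     """
--     priority_keys = [
--         'methods', 'materials and methods', 'experimental setup',
--         'results', 'evaluation', 'experiments',
--         'discussion', 'limitations', 'limitation',
--         'future work', 'future directions', 'conclusion', 'conclusions',
--         'full',
--     ]
--
--     selected = []
--     total = 0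
--     used_keys = set()
--
--     for pk in priority_keys:
--         for k, v in sections.items():
--             if pk in k and k not in used_keys:
--                 chunk = v[:max_chars // 4]
--                 selected.append(f'[{k.upper()}]\n{chunk}')
--                 total += len(chunk)
--                 used_keys.add(k)
--                 if total >= max_chars:
--                     break
--         if total >= max_chars:
--             break
--
--     # Fill remaining from other sections
--     for k, v in sections.items():
--         if k not in used_keys and total < max_chars:
--             chunk = v[: max_chars - total]
--             selected.append(f'[{k.upper()}]\n{chunk}')
--             total += len(chunk)
--
--     return '\n\n'.join(selected)[:max_chars]
-- ===== SOURCE B (Python) =====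
-- def get_key_sections(sections: dict[str, str], max_chars: int = 8000) -> str:
--     """Same output as A: build a (priority-tier, key, value) index once, stable-sort by
--     tier, and make one pass with an early break, then fill from the unmatched sections."""
--     priority_keys = [
--         'methods', 'materials and methods', 'experimental setup',
--         'results', 'evaluation', 'experiments',
--         'discussion', 'limitations', 'limitation',
--         'future work', 'future directions', 'conclusion', 'conclusions',
--         'full',
--     ]
--
--     def tier(k):
--         for i, pk in enumerate(priority_keys):
--             if pk in k:
--                 return i
--         return None
--
--     matched = []
--     for k, v in sections.items():
--         t = tier(k)
--         if t is not None:
--             matched.append((t, k, v))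
--     matched = sorted(matched, key=lambda m: m[0])
--
--     selected = []
--     total = 0
--     consumed = set()
--     for t, k, v in matched:
--         if total >= max_chars:
--             break
--         chunk = v[:max_chars // 4]
--         selected.append(f'[{k.upper()}]\n{chunk}')
--         total += len(chunk)
--         consumed.add(k)
--
--     for k, v in sections.items():
--         if k in consumed:
--             continue
--         if total >= max_chars:
--             break
--         chunk = v[: max_chars - total]
--         selected.append(f'[{k.upper()}]\n{chunk}')
--         total += len(chunk)
--
--     return '\n\n'.join(selected)[:max_chars]
-- ===== Notes on version B (the rewrite author's own statement) =====
-- stated objective: alternative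
-- what changed: A repeatedly rescans all sections once per priority key with a used-keys set; B computes each section's first-matching priority tier once, stable-sorts the matched sections by tier, and makes a single early-exit pass, then fills from unmatched sections.
-- outside the precondition, e.g. on get_key_sections({'methods': 'abc'}, -1): A returns '[METHODS]\na', B returns ''
import Mathlib
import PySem

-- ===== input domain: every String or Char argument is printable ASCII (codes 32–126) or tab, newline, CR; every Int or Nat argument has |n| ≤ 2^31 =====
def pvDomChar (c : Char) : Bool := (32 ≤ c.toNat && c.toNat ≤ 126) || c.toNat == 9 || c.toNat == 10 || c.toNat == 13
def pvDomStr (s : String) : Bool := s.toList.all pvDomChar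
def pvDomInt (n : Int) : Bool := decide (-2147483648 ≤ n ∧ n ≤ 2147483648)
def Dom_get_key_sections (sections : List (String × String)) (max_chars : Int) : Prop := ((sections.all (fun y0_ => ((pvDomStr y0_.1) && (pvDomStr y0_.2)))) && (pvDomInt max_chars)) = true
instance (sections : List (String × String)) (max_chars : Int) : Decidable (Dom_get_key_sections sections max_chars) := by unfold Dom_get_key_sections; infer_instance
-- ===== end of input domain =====

-- B replaces A's per-priority-key rescans of the section dict by a one-time first-match tier
-- index, a stable sort by tier and a single early-exit pass (objective: alternative algorithm,
-- same result).

-- ===== PORT A =====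
def pvPriorityKeys : List String :=
  ["methods", "materials and methods", "experimental setup",
   "results", "evaluation", "experiments",
   "discussion", "limitations", "limitation",
   "future work", "future directions", "conclusion", "conclusions",
   "full"]

-- inner 'for k, v in sections.items(): …' loop of A (returns the state and the break flag)
def pvInnerA (mc : Int) (pk : String) :
    List (String × String) → List String → Int → PySem.Set String →
    ((List String × Int × PySem.Set String) × Bool)
  | [], sel, tot, used => ((sel, tot, used), false)
  | (k, v) :: rest, sel, tot, used =>
    if PySem.Str.isIn pk k && !(PySem.Set.contains used k) then
      let chunk := PySem.Str.slice v none (some (PySem.Int.floordiv mc 4))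
      let sel' := sel ++ ["[" ++ PySem.Str.upper k ++ "]\n" ++ chunk]
      let tot' := tot + PySem.Str.len chunk
      let used' := PySem.Set.add used k
      if mc ≤ tot' then ((sel', tot', used'), true)
      else pvInnerA mc pk rest sel' tot' used'
    else pvInnerA mc pk rest sel tot used

-- outer 'for pk in priority_keys: …' loop of A
def pvOuterA (mc : Int) (sections : List (String × String)) :
    List String → List String → Int → PySem.Set String →
    (List String × Int × PySem.Set String)
  | [], sel, tot, used => (sel, tot, used)
  | pk :: pks, sel, tot, used =>
    match pvInnerA mc pk sections sel tot used with
    | ((sel', tot', used'), broke) =>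
      if broke then (sel', tot', used')
      else if mc ≤ tot' then (sel', tot', used')
      else pvOuterA mc sections pks sel' tot' used'

-- A's fill loop ('for k, v in sections.items(): if k not in used_keys and total < max_chars: …')
def pvFillA (mc : Int) (used : PySem.Set String) (sections : List (String × String))
    (sel : List String) (tot : Int) : List String × Int :=
  sections.foldl (fun st kv =>
    if !(PySem.Set.contains used kv.1) && st.2 < mc then
      let chunk := PySem.Str.slice kv.2 none (some (mc - st.2))
      (st.1 ++ ["[" ++ PySem.Str.upper kv.1 ++ "]\n" ++ chunk], st.2 + PySem.Str.len chunk)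
    else st) (sel, tot)

def get_key_sections (sections : List (String × String)) (max_chars : Int) : String :=
  match pvOuterA max_chars sections pvPriorityKeys [] 0 PySem.Set.empty with
  | (sel, tot, used) =>
    match pvFillA max_chars used sections sel tot with
    | (sel2, _) => PySem.Str.slice (PySem.Str.join "\n\n" sel2) none (some max_chars)

-- ===== PORT B =====
-- B's tier(k): index of the first priority key contained in k
def pvTier : List String → Int → String → Option Int
  | [], _, _ => none
  | pk :: rest, i, k => if PySem.Str.isIn pk k then some i else pvTier rest (i + 1) k

-- B's matched-section index build loop
def pvMatched (sections : List (String × String)) : List (Int × String × String) :=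
  sections.foldl (fun acc kv =>
    match pvTier pvPriorityKeys 0 kv.1 with
    | some t => acc ++ [(t, kv.1, kv.2)]
    | none => acc) []

-- B's single pass over the sorted matched sections ('if total >= max_chars: break')
def pvPassB (mc : Int) :
    List (Int × String × String) → List String → Int → PySem.Set String →
    (List String × Int × PySem.Set String)
  | [], sel, tot, cons => (sel, tot, cons)
  | (_, k, v) :: rest, sel, tot, cons =>
    if mc ≤ tot then (sel, tot, cons)
    else
      let chunk := PySem.Str.slice v none (some (PySem.Int.floordiv mc 4))
      pvPassB mc rest (sel ++ ["[" ++ PySem.Str.upper k ++ "]\n" ++ chunk])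
        (tot + PySem.Str.len chunk) (PySem.Set.add cons k)

-- B's fill loop ('continue' on consumed keys, 'break' when full)
def pvFillB (mc : Int) (cons : PySem.Set String) :
    List (String × String) → List String → Int → (List String × Int)
  | [], sel, tot => (sel, tot)
  | (k, v) :: rest, sel, tot =>
    if PySem.Set.contains cons k then pvFillB mc cons rest sel tot
    else if mc ≤ tot then (sel, tot)
    else
      let chunk := PySem.Str.slice v none (some (mc - tot))
      pvFillB mc cons rest (sel ++ ["[" ++ PySem.Str.upper k ++ "]\n" ++ chunk])
        (tot + PySem.Str.len chunk)

def get_key_sections_alt (sections : List (String × String)) (max_chars : Int) : String :=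
  match pvPassB max_chars (PySem.List.sorted (pvMatched sections) (fun m => m.1) false)
          [] 0 PySem.Set.empty with
  | (sel, tot, cons) =>
    match pvFillB max_chars cons sections sel tot with
    | (sel2, _) => PySem.Str.slice (PySem.Str.join "\n\n" sel2) none (some max_chars)

-- ===== PRECONDITION & SPEC =====
-- Pre_ excludes association lists with duplicate keys (a Python dict argument can never contain
-- them) and negative max_chars on inputs that hold a section whose key contains 'methods' (a
-- negative size cap is outside the natural domain; A there returns a stray fragment of that
-- section produced by negative slicing, while B returns the empty string).
def Pre_get_key_sections (sections : List (String × String)) (max_chars : Int) : Prop :=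
  (sections.map Prod.fst).Nodup ∧
    (0 ≤ max_chars ∨ sections.all (fun kv => !(PySem.Str.isIn "methods" kv.1)) = true)
instance (sections : List (String × String)) (max_chars : Int) : Decidable (Pre_get_key_sections sections max_chars) := by unfold Pre_get_key_sections; infer_instance

def pvWitness_get_key_sections : (List (String × String)) × Int :=
  ([("methods", "abc"), ("intro", "xy")], 8000)

def Spec_get_key_sections (sections : List (String × String)) (max_chars : Int) (out : String) : Prop := out = get_key_sections_alt sections max_chars
instance (sections : List (String × String)) (max_chars : Int) (out : String) : Decidable (Spec_get_key_sections sections max_chars out) := by unfold Spec_get_key_sections; infer_instance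

-- ===== CLAIM (what is proved, stated in full; the proofs are below) =====
def Claim_equal_get_key_sections : Prop := ∀ (sections : List (String × String)) (max_chars : Int), Dom_get_key_sections sections max_chars → Pre_get_key_sections sections max_chars → Spec_get_key_sections sections max_chars (get_key_sections sections max_chars)

-- ===== LEMMAS AND PROOFS =====

-- reference runner both phases are reduced to: process every item, break after the append
-- that reaches max_chars (this is proof-side vocabulary, used by no port)
def pvRunA (mc : Int) :
    List (Int × String × String) → List String → Int → PySem.Set String →
    ((List String × Int × PySem.Set String) × Bool)
  | [], sel, tot, u => ((sel, tot, u), false)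
  | (_, k, v) :: rest, sel, tot, u =>
    let chunk := PySem.Str.slice v none (some (PySem.Int.floordiv mc 4))
    let sel' := sel ++ ["[" ++ PySem.Str.upper k ++ "]\n" ++ chunk]
    let tot' := tot + PySem.Str.len chunk
    let u' := PySem.Set.add u k
    if mc ≤ tot' then ((sel', tot', u'), true)
    else pvRunA mc rest sel' tot' u'

-- the matched sections grouped by tier, tiers i, i+1, …, i+c-1 in order
def pvOrd (sections : List (String × String)) : Int → Nat → List (Int × String × String)
  | _, 0 => []
  | i, c + 1 =>
    (sections.filter (fun kv => pvTier pvPriorityKeys 0 kv.1 == some i)).map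
      (fun kv => (i, kv)) ++ pvOrd sections (i + 1) c

-- generic tier grouping of any list by an Int key
def pvTiersF {α : Type} (key : α → Int) (xs : List α) : Int → Nat → List α
  | _, 0 => []
  | i, c + 1 => xs.filter (fun x => key x == i) ++ pvTiersF key xs (i + 1) c

-- ---- small facts ----

theorem pv_slice_zero (s : String) : PySem.Str.slice s none (some 0) = "" := by
  simp only [PySem.Str.slice, PySem.Chars.slice]
  rw [PySem.List.slice_to s.toList (le_refl (0 : Int))]
  rfl

theorem pv_contains_add (s : PySem.Set String) (x y : String) :
    PySem.Set.contains (PySem.Set.add s x) y = (PySem.Set.contains s y || y == x) := by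
  simp only [PySem.Set.add, PySem.Set.contains]
  split_ifs with h
  · by_cases hyx : y = x
    · subst hyx
      simp_all
    · simp [hyx]
  · by_cases hyx : y = x
    · subst hyx
      simp
    · simp [hyx]

-- ---- pvTier facts ----

theorem pvTier_bounds {pks : List String} {i t : Int} {k : String}
    (h : pvTier pks i k = some t) : i ≤ t ∧ t < i + pks.length := by
  induction pks generalizing i with
  | nil => simp [pvTier] at h
  | cons pk rest ih =>
    simp only [pvTier] at h
    split at h
    · cases h
      simp only [List.length_cons]
      push_cast
      omega
    · have := ih h
      simp only [List.length_cons]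
      push_cast at this ⊢
      omega

theorem pvTier_append_not {pre : List String} {k : String}
    (h : ∀ p ∈ pre, PySem.Str.isIn p k = false) (pks : List String) (i : Int) :
    pvTier (pre ++ pks) i k = pvTier pks (i + pre.length) k := by
  induction pre generalizing i with
  | nil => simp
  | cons p pre' ih =>
    have hp : PySem.Str.isIn p k = false := h p (by simp)
    have h' : ∀ q ∈ pre', PySem.Str.isIn q k = false := fun q hq => h q (by simp [hq])
    simp only [List.cons_append, pvTier, hp, Bool.false_eq_true, if_false, ih h',
      List.length_cons]
    congr 1
    push_cast
    ring

theorem pvTier_any {pre : List String} {k : String}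
    (h : pre.any (fun p => PySem.Str.isIn p k) = true) (pks : List String) (i : Int) :
    ∃ t, pvTier (pre ++ pks) i k = some t ∧ t < i + pre.length := by
  induction pre generalizing i with
  | nil => simp at h
  | cons p pre' ih =>
    cases hp : PySem.Str.isIn p k with
    | true =>
      refine ⟨i, ?_, ?_⟩
      · simp only [List.cons_append, pvTier, hp]
        simp
      · simp only [List.length_cons]
        push_cast
        omega
    | false =>
      have h' : pre'.any (fun q => PySem.Str.isIn q k) = true := by
        simp only [List.any_cons, hp, Bool.false_or] at h
        exact h
      obtain ⟨t, ht, hlt⟩ := ih h' (i + 1)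
      refine ⟨t, ?_, ?_⟩
      · simp only [List.cons_append, pvTier, hp, Bool.false_eq_true, if_false]
        exact ht
      · simp only [List.length_cons]
        push_cast at hlt ⊢
        omega

-- ---- matched-list facts ----

theorem pvMatched_eq (sections : List (String × String)) :
    pvMatched sections =
      sections.filterMap (fun kv => (pvTier pvPriorityKeys 0 kv.1).map (fun t => (t, kv.1, kv.2))) := by
  have aux : ∀ (secs : List (String × String)) (acc : List (Int × String × String)),
      secs.foldl (fun acc kv =>
        match pvTier pvPriorityKeys 0 kv.1 with
        | some t => acc ++ [(t, kv.1, kv.2)]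
        | none => acc) acc
      = acc ++ secs.filterMap (fun kv => (pvTier pvPriorityKeys 0 kv.1).map (fun t => (t, kv.1, kv.2))) := by
    intro secs
    induction secs with
    | nil => intro acc; simp
    | cons kv rest ih =>
      intro acc
      simp only [List.foldl_cons, List.filterMap_cons]
      cases htier : pvTier pvPriorityKeys 0 kv.1 with
      | none => simp [ih]
      | some t => simp [ih]
  simpa [pvMatched] using aux sections []

theorem pvMatched_filter (sections : List (String × String)) (i : Int) :
    (pvMatched sections).filter (fun m => m.1 == i) =
      (sections.filter (fun kv => pvTier pvPriorityKeys 0 kv.1 == some i)).map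
        (fun kv => (i, kv)) := by
  rw [pvMatched_eq]
  induction sections with
  | nil => simp
  | cons kv rest ih =>
    simp only [List.filterMap_cons, List.filter_cons]
    cases htier : pvTier pvPriorityKeys 0 kv.1 with
    | none => simpa using ih
    | some t =>
      by_cases hti : t = i
      · subst hti
        simp [ih]
      · simp [hti, ih]

theorem pvMatched_bounds {sections : List (String × String)} {m : Int × String × String}
    (h : m ∈ pvMatched sections) : 0 ≤ m.1 ∧ m.1 < 14 := by
  rw [pvMatched_eq] at h
  obtain ⟨kv, _hkv, hmap⟩ := List.mem_filterMap.1 h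
  cases htier : pvTier pvPriorityKeys 0 kv.1 with
  | none => simp [htier] at hmap
  | some t =>
    simp only [htier, Option.map_some, Option.some.injEq] at hmap
    have hb := pvTier_bounds htier
    have hlen : pvPriorityKeys.length = 14 := by rfl
    rw [hlen] at hb
    subst hmap
    simpa using hb

-- ---- stable sort = tier grouping ----

theorem pv_insertBy_skip {α : Type} (before : α → α → Bool) (x : α) {l1 : List α}
    (h : ∀ y ∈ l1, before x y = false) (l2 : List α) :
    PySem.List.insertBy before x (l1 ++ l2) = l1 ++ PySem.List.insertBy before x l2 := by
  induction l1 with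
  | nil => rfl
  | cons y ys ih =>
    have hy : before x y = false := h y (by simp)
    have h' : ∀ z ∈ ys, before x z = false := fun z hz => h z (by simp [hz])
    simp [PySem.List.insertBy, hy, ih h']

theorem pv_insertBy_all {α : Type} (before : α → α → Bool) (x : α) {l : List α}
    (h : ∀ y ∈ l, before x y = true) :
    PySem.List.insertBy before x l = x :: l := by
  cases l with
  | nil => rfl
  | cons y ys => simp [PySem.List.insertBy, h y (by simp)]

theorem pv_mem_tiersF {α : Type} {key : α → Int} {xs : List α} {i : Int} {c : Nat} {y : α}
    (h : y ∈ pvTiersF key xs i c) : i ≤ key y ∧ y ∈ xs := by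
  induction c generalizing i with
  | zero => simp [pvTiersF] at h
  | succ c ih =>
    simp only [pvTiersF, List.mem_append] at h
    rcases h with h | h
    · obtain ⟨hmem, hkey⟩ := List.mem_filter.1 h
      have hk : key y = i := by simpa using hkey
      exact ⟨by omega, hmem⟩
    · obtain ⟨h1, h2⟩ := ih h
      exact ⟨by omega, h2⟩

theorem pvTiersF_append_lt {α : Type} {key : α → Int} (xs : List α) {x : α} {i : Int} {c : Nat}
    (h : key x < i) : pvTiersF key (xs ++ [x]) i c = pvTiersF key xs i c := by
  induction c generalizing i with
  | zero => rfl
  | succ c ih =>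
    have hne : (key x == i) = false := by simp; omega
    simp only [pvTiersF, List.filter_append, List.filter_cons, hne, Bool.false_eq_true,
      if_false, List.filter_nil, List.append_nil]
    rw [ih (by omega)]

theorem pvTiersF_insert {α : Type} {key : α → Int} (xs : List α) {x : α} {i : Int} {c : Nat}
    (h1 : i ≤ key x) (h2 : key x < i + c) :
    PySem.List.insertBy (fun a b => decide (key a < key b)) x (pvTiersF key xs i c) =
      pvTiersF key (xs ++ [x]) i c := by
  induction c generalizing i xs with
  | zero => omega
  | succ c ih =>
    by_cases hxi : key x = i
    · have hskip : ∀ y ∈ xs.filter (fun z => key z == i),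
          (fun a b => decide (key a < key b)) x y = false := by
        intro y hy
        have : key y = i := by simpa using (List.mem_filter.1 hy).2
        simp only [decide_eq_false_iff_not]
        omega
      have hall : ∀ y ∈ pvTiersF key xs (i + 1) c,
          (fun a b => decide (key a < key b)) x y = true := by
        intro y hy
        have := (pv_mem_tiersF hy).1
        simp only [decide_eq_true_eq]
        omega
      have hxe : (key x == i) = true := by simp [hxi]
      simp only [pvTiersF, List.filter_append, List.filter_cons, hxe, if_true,
        List.filter_nil]
      rw [pv_insertBy_skip _ _ hskip, pv_insertBy_all _ _ hall,
        pvTiersF_append_lt xs (by omega)]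
      simp
    · have hlt : i < key x := by omega
      have hne : (key x == i) = false := by simp; omega
      have hskip : ∀ y ∈ xs.filter (fun z => key z == i),
          (fun a b => decide (key a < key b)) x y = false := by
        intro y hy
        have : key y = i := by simpa using (List.mem_filter.1 hy).2
        simp only [decide_eq_false_iff_not]
        omega
      simp only [pvTiersF, List.filter_append, List.filter_cons, hne, Bool.false_eq_true,
        if_false, List.filter_nil, List.append_nil]
      rw [pv_insertBy_skip _ _ hskip, ih xs (by omega) (by push_cast at h2 ⊢; omega)]

theorem pv_sorted_tiersF {α : Type} (key : α → Int) (xs : List α) {i : Int} {c : Nat}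
    (h : ∀ x ∈ xs, i ≤ key x ∧ key x < i + c) :
    PySem.List.sorted xs key false = pvTiersF key xs i c := by
  have hnil : ∀ (j : Int) (d : Nat), pvTiersF key ([] : List α) j d = [] := by
    intro j d
    induction d generalizing j with
    | zero => rfl
    | succ d ihd => simp [pvTiersF, ihd]
  induction xs using List.reverseRecOn with
  | nil => simp [PySem.List.sorted, hnil]
  | append_singleton xs x ih =>
    rw [PySem.List.sorted_eq_foldl_insertBy, List.foldl_append, List.foldl_cons,
      List.foldl_nil, ← PySem.List.sorted_eq_foldl_insertBy,
      ih (fun z hz => h z (by simp [hz]))]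
    exact pvTiersF_insert xs (h x (by simp)).1 (h x (by simp)).2

theorem pvTiersF_ord (sections : List (String × String)) (c : Nat) (i : Int) :
    pvTiersF (fun m => m.1) (pvMatched sections) i c = pvOrd sections i c := by
  induction c generalizing i with
  | zero => rfl
  | succ c ih => simp only [pvTiersF, pvOrd, pvMatched_filter, ih]

-- ---- pvRunA facts ----

-- the state update both programs perform on a processed section (proof-side shorthand)
def pvSel' (mc : Int) (sel : List String) (k v : String) : List String :=
  sel ++ ["[" ++ PySem.Str.upper k ++ "]\n" ++ PySem.Str.slice v none (some (PySem.Int.floordiv mc 4))]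

def pvTot' (mc tot : Int) (v : String) : Int :=
  tot + PySem.Str.len (PySem.Str.slice v none (some (PySem.Int.floordiv mc 4)))

theorem pvRunA_cons (mc : Int) (t : Int) (k v : String) (rest : List (Int × String × String))
    (sel : List String) (tot : Int) (u : PySem.Set String) :
    pvRunA mc ((t, k, v) :: rest) sel tot u =
      (if mc ≤ pvTot' mc tot v then ((pvSel' mc sel k v, pvTot' mc tot v, PySem.Set.add u k), true)
       else pvRunA mc rest (pvSel' mc sel k v) (pvTot' mc tot v) (PySem.Set.add u k)) := by
  simp only [pvRunA, pvSel', pvTot']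

theorem pv_key_unique {sections : List (String × String)} {kv kv' : String × String}
    (hN : (sections.map Prod.fst).Nodup) (h : kv ∈ sections) (h' : kv' ∈ sections)
    (he : kv.1 = kv'.1) : kv = kv' := by
  induction sections with
  | nil => cases h
  | cons a rest ih =>
    simp only [List.map_cons, List.nodup_cons] at hN
    rcases List.mem_cons.1 h with h1 | h1
    · rcases List.mem_cons.1 h' with h2 | h2
      · rw [h1, h2]
      · exfalso
        apply hN.1
        have h3 : kv'.1 ∈ rest.map Prod.fst := List.mem_map_of_mem h2
        rwa [← he, h1] at h3
    · rcases List.mem_cons.1 h' with h2 | h2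
      · exfalso
        apply hN.1
        have h3 : kv.1 ∈ rest.map Prod.fst := List.mem_map_of_mem h1
        rwa [he, h2] at h3
      · exact ih hN.2 h1 h2


theorem pvRunA_append (mc : Int) (l1 l2 : List (Int × String × String))
    (sel : List String) (tot : Int) (u : PySem.Set String) :
    pvRunA mc (l1 ++ l2) sel tot u =
      (if (pvRunA mc l1 sel tot u).2 then pvRunA mc l1 sel tot u
       else pvRunA mc l2 (pvRunA mc l1 sel tot u).1.1
         (pvRunA mc l1 sel tot u).1.2.1 (pvRunA mc l1 sel tot u).1.2.2) := by
  induction l1 generalizing sel tot u with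
  | nil => simp [pvRunA]
  | cons m rest ih =>
    obtain ⟨t, k, v⟩ := m
    rw [List.cons_append, pvRunA_cons, pvRunA_cons]
    by_cases hb : mc ≤ pvTot' mc tot v
    · rw [if_pos hb, if_pos hb]
      simp
    · rw [if_neg hb, if_neg hb]
      exact ih _ _ _

theorem pvRunA_false_tot {mc : Int} {l : List (Int × String × String)}
    {sel : List String} {tot : Int} {u : PySem.Set String}
    (h : tot < mc) (hf : (pvRunA mc l sel tot u).2 = false) :
    (pvRunA mc l sel tot u).1.2.1 < mc := by
  induction l generalizing sel tot u with
  | nil => simpa [pvRunA] using h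
  | cons m rest ih =>
    obtain ⟨t, k, v⟩ := m
    by_cases hcond : mc ≤ tot + PySem.Str.len (PySem.Str.slice v none (some (PySem.Int.floordiv mc 4)))
    · have hT : (pvRunA mc ((t, k, v) :: rest) sel tot u).2 = true := by
        simp only [pvRunA, if_pos hcond]
      rw [hT] at hf
      cases hf
    · have hstep : pvRunA mc ((t, k, v) :: rest) sel tot u =
          pvRunA mc rest
            (sel ++ ["[" ++ PySem.Str.upper k ++ "]
" ++ PySem.Str.slice v none (some (PySem.Int.floordiv mc 4))])
            (tot + PySem.Str.len (PySem.Str.slice v none (some (PySem.Int.floordiv mc 4))))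
            (PySem.Set.add u k) := by
        simp only [pvRunA, if_neg hcond]
      rw [hstep] at hf ⊢
      exact ih (by omega) hf

theorem pvRunA_false_used {mc : Int} {l : List (Int × String × String)}
    {sel : List String} {tot : Int} {u : PySem.Set String}
    (hf : (pvRunA mc l sel tot u).2 = false) :
    (pvRunA mc l sel tot u).1.2.2 = l.foldl (fun s m => PySem.Set.add s m.2.1) u := by
  induction l generalizing sel tot u with
  | nil => simp [pvRunA]
  | cons m rest ih =>
    obtain ⟨t, k, v⟩ := m
    by_cases hcond : mc ≤ tot + PySem.Str.len (PySem.Str.slice v none (some (PySem.Int.floordiv mc 4)))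
    · have hT : (pvRunA mc ((t, k, v) :: rest) sel tot u).2 = true := by
        simp only [pvRunA, if_pos hcond]
      rw [hT] at hf
      cases hf
    · have hstep : pvRunA mc ((t, k, v) :: rest) sel tot u =
          pvRunA mc rest
            (sel ++ ["[" ++ PySem.Str.upper k ++ "]
" ++ PySem.Str.slice v none (some (PySem.Int.floordiv mc 4))])
            (tot + PySem.Str.len (PySem.Str.slice v none (some (PySem.Int.floordiv mc 4))))
            (PySem.Set.add u k) := by
        simp only [pvRunA, if_neg hcond]
      rw [hstep] at hf ⊢
      rw [List.foldl_cons]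
      exact ih hf

theorem pv_contains_foldl_add (l : List (Int × String × String)) (u : PySem.Set String) (k : String) :
    PySem.Set.contains (l.foldl (fun s m => PySem.Set.add s m.2.1) u) k =
      (PySem.Set.contains u k || l.any (fun m => k == m.2.1)) := by
  induction l generalizing u with
  | nil => simp
  | cons m rest ih =>
    simp only [List.foldl_cons, List.any_cons, ih, pv_contains_add]
    cases PySem.Set.contains u k <;> cases hk : (k == m.2.1) <;> simp

-- ---- the two phases ----

theorem pvInnerA_eq {mc : Int} {pk : String} {i : Int}
    (secs : List (String × String)) (sel : List String) (tot : Int) (u : PySem.Set String)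
    (hN : (secs.map Prod.fst).Nodup)
    (hc : ∀ kv ∈ secs, (PySem.Str.isIn pk kv.1 && !(PySem.Set.contains u kv.1)) =
      (pvTier pvPriorityKeys 0 kv.1 == some i)) :
    pvInnerA mc pk secs sel tot u =
      pvRunA mc ((secs.filter (fun kv => pvTier pvPriorityKeys 0 kv.1 == some i)).map
        (fun kv => (i, kv))) sel tot u := by
  induction secs generalizing sel tot u with
  | nil => rfl
  | cons kv rest ih =>
    obtain ⟨k, v⟩ := kv
    have hNk : k ∉ rest.map Prod.fst ∧ (rest.map Prod.fst).Nodup := by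
      simpa using hN
    have hck := hc (k, v) (by simp)
    have hcr : ∀ kv' ∈ rest, (PySem.Str.isIn pk kv'.1 && !(PySem.Set.contains u kv'.1)) =
        (pvTier pvPriorityKeys 0 kv'.1 == some i) := fun kv' h' => hc kv' (by simp [h'])
    cases hcond : (PySem.Str.isIn pk k && !(PySem.Set.contains u k)) with
    | false =>
      have hp : (pvTier pvPriorityKeys 0 k == some i) = false := by rw [← hck]; exact hcond
      have hstepL : pvInnerA mc pk ((k, v) :: rest) sel tot u = pvInnerA mc pk rest sel tot u := by
        simp only [pvInnerA, hcond, Bool.false_eq_true, if_false]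
      rw [hstepL, List.filter_cons]
      simp only [hp, Bool.false_eq_true, if_false]
      exact ih _ _ _ hNk.2 hcr
    | true =>
      have hp : (pvTier pvPriorityKeys 0 k == some i) = true := by rw [← hck]; exact hcond
      have hstepL : pvInnerA mc pk ((k, v) :: rest) sel tot u =
          (if mc ≤ pvTot' mc tot v then ((pvSel' mc sel k v, pvTot' mc tot v, PySem.Set.add u k), true)
           else pvInnerA mc pk rest (pvSel' mc sel k v) (pvTot' mc tot v) (PySem.Set.add u k)) := by
        simp only [pvInnerA, hcond, if_true, pvSel', pvTot']
      rw [hstepL, List.filter_cons]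
      simp only [hp, if_true, List.map_cons, pvRunA_cons]
      by_cases hb : mc ≤ pvTot' mc tot v
      · rw [if_pos hb, if_pos hb]
      · rw [if_neg hb, if_neg hb]
        refine ih _ _ _ hNk.2 ?_
        intro kv' h'
        have hne : kv'.1 ≠ k := by
          intro hkk
          exact hNk.1 (hkk ▸ List.mem_map_of_mem h')
        rw [pv_contains_add, beq_eq_false_iff_ne.2 hne, Bool.or_false]
        exact hcr kv' h'

theorem pvOuterA_eq {mc : Int} {sections : List (String × String)}
    (hN : (sections.map Prod.fst).Nodup)
    (pks pre : List String) (sel : List String) (tot : Int) (u : PySem.Set String)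
    (hsplit : pvPriorityKeys = pre ++ pks) (htot : tot < mc)
    (hu : ∀ kv ∈ sections, PySem.Set.contains u kv.1 = pre.any (fun p => PySem.Str.isIn p kv.1)) :
    pvOuterA mc sections pks sel tot u =
      (pvRunA mc (pvOrd sections pre.length pks.length) sel tot u).1 := by
  induction pks generalizing pre sel tot u with
  | nil => simp only [pvOuterA, List.length_nil, pvOrd, pvRunA]
  | cons pk pks' ih =>
    have hc : ∀ kv ∈ sections, (PySem.Str.isIn pk kv.1 && !(PySem.Set.contains u kv.1)) =
        (pvTier pvPriorityKeys 0 kv.1 == some (pre.length : Int)) := by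
      intro kv hkv
      rw [hu kv hkv, hsplit]
      cases hpre : pre.any (fun p => PySem.Str.isIn p kv.1) with
      | true =>
        obtain ⟨t, ht, hlt⟩ := pvTier_any hpre (pk :: pks') 0
        have hne : t ≠ (pre.length : Int) := by omega
        simp [ht, hne]
      | false =>
        have hall : ∀ p ∈ pre, PySem.Str.isIn p kv.1 = false := by
          intro p hp
          by_contra hcon
          have : pre.any (fun p => PySem.Str.isIn p kv.1) = true :=
            List.any_eq_true.2 ⟨p, hp, by simpa using hcon⟩
          rw [hpre] at this
          cases this
        rw [pvTier_append_not hall (pk :: pks') 0]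
        simp only [pvTier, zero_add]
        cases hpk : PySem.Str.isIn pk kv.1 with
        | true => simp
        | false =>
          simp only [Bool.false_eq_true, if_false, Bool.false_and]
          cases hrec : pvTier pks' ((pre.length : Int) + 1) kv.1 with
          | none => simp
          | some t =>
            have hb := (pvTier_bounds hrec).1
            have hne : t ≠ (pre.length : Int) := by omega
            simp [hne]
    have hIA := pvInnerA_eq (mc := mc) (pk := pk) (i := (pre.length : Int)) sections sel tot u hN hc
    have hOut : pvOuterA mc sections (pk :: pks') sel tot u =
        (match pvInnerA mc pk sections sel tot u with
         | ((sel', tot', used'), broke) =>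
           if broke then (sel', tot', used')
           else if mc ≤ tot' then (sel', tot', used')
           else pvOuterA mc sections pks' sel' tot' used') := by
      simp only [pvOuterA]
    have hOrd : pvOrd sections (pre.length : Int) (pks'.length + 1) =
        (sections.filter (fun kv => pvTier pvPriorityKeys 0 kv.1 == some ((pre.length : Int)))).map
          (fun kv => ((pre.length : Int), kv)) ++
          pvOrd sections ((pre.length : Int) + 1) pks'.length := by
      simp only [pvOrd]
    rcases hR : pvRunA mc
        ((sections.filter (fun kv => pvTier pvPriorityKeys 0 kv.1 == some ((pre.length : Int)))).map
          (fun kv => ((pre.length : Int), kv))) sel tot u with ⟨⟨sel', tot', u'⟩, b⟩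
    have hIA' := hIA.trans hR
    have hOut' : pvOuterA mc sections (pk :: pks') sel tot u =
        (if b then (sel', tot', u')
         else if mc ≤ tot' then (sel', tot', u')
         else pvOuterA mc sections pks' sel' tot' u') := by
      rw [hOut, hIA']
    rw [hOut']
    simp only [List.length_cons]
    rw [hOrd, pvRunA_append, hR]
    cases b with
    | true => simp
    | false =>
      have htot' : tot' < mc := by
        have h2 := pvRunA_false_tot htot (by rw [hR])
        rwa [hR] at h2
      simp only [Bool.false_eq_true, if_false, if_neg (not_le.2 htot')]
      have hu' : ∀ kv ∈ sections, PySem.Set.contains u' kv.1 =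
          (pre ++ [pk]).any (fun p => PySem.Str.isIn p kv.1) := by
        intro kv hkv
        have hused := pvRunA_false_used (mc := mc)
          (l := (sections.filter (fun kv => pvTier pvPriorityKeys 0 kv.1 == some ((pre.length : Int)))).map
            (fun kv => ((pre.length : Int), kv)))
          (sel := sel) (tot := tot) (u := u) (by rw [hR])
        rw [hR] at hused
        simp only at hused
        rw [hused, pv_contains_foldl_add, hu kv hkv, List.any_append]
        simp only [List.any_cons, List.any_nil, Bool.or_false]
        cases hpre : pre.any (fun p => PySem.Str.isIn p kv.1) with
        | true => simp
        | false =>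
          simp only [Bool.false_or]
          have hckv := hc kv hkv
          rw [hu kv hkv, hpre] at hckv
          simp only [Bool.not_false, Bool.and_true] at hckv
          cases hpk : PySem.Str.isIn pk kv.1 with
          | true =>
            have hfil : kv ∈ sections.filter
                (fun kv => pvTier pvPriorityKeys 0 kv.1 == some ((pre.length : Int))) :=
              List.mem_filter.2 ⟨hkv, by rw [← hckv]; exact hpk⟩
            refine List.any_eq_true.2 ⟨((pre.length : Int), kv.1, kv.2), List.mem_map_of_mem hfil, by simp⟩
          | false =>
            rw [hpk] at hckv
            by_contra hcon
            have hany := Bool.of_not_eq_false hcon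
            obtain ⟨m, hm, hmk⟩ := List.any_eq_true.1 hany
            obtain ⟨kv', hkv', hkv'm⟩ := List.mem_map.1 hm
            have hk'1 : kv.1 = kv'.1 := by
              have : kv.1 = m.2.1 := by simpa using hmk
              rw [this, ← hkv'm]
            have hkveq : kv' = kv :=
              pv_key_unique hN (List.mem_filter.1 hkv').1 hkv (hk'1.symm)
            have : (pvTier pvPriorityKeys 0 kv.1 == some ((pre.length : Int))) = true := by
              have := (List.mem_filter.1 hkv').2
              rwa [hkveq] at this
            rw [← hckv] at this
            cases this
      have hlen : ((pre ++ [pk]).length : Int) = (pre.length : Int) + 1 := by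
        simp
      have hihr := ih (pre ++ [pk]) sel' tot' u' (by rw [hsplit, List.append_assoc]; rfl) htot' hu'
      rw [hlen] at hihr
      exact hihr

theorem pvPassB_stop {mc tot : Int} (l : List (Int × String × String))
    (sel : List String) (cons : PySem.Set String) (h : mc ≤ tot) :
    pvPassB mc l sel tot cons = (sel, tot, cons) := by
  cases l with
  | nil => rfl
  | cons m rest =>
    obtain ⟨t, k, v⟩ := m
    simp only [pvPassB, if_pos h]

theorem pvPassB_eq {mc : Int} (l : List (Int × String × String))
    (sel : List String) (tot : Int) (cons : PySem.Set String) (h : tot < mc) :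
    pvPassB mc l sel tot cons = (pvRunA mc l sel tot cons).1 := by
  induction l generalizing sel tot cons with
  | nil => rfl
  | cons m rest ih =>
    obtain ⟨t, k, v⟩ := m
    have hstep : pvPassB mc ((t, k, v) :: rest) sel tot cons =
        pvPassB mc rest (pvSel' mc sel k v) (pvTot' mc tot v) (PySem.Set.add cons k) := by
      simp only [pvPassB, if_neg (not_le.2 h), pvSel', pvTot']
    rw [hstep, pvRunA_cons]
    by_cases hb : mc ≤ pvTot' mc tot v
    · rw [if_pos hb]
      exact pvPassB_stop rest _ _ hb
    · rw [if_neg hb]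
      exact ih _ _ _ (lt_of_not_ge hb)

theorem pvFillA_stuck {mc : Int} (u : PySem.Set String) (secs : List (String × String))
    (sel : List String) {tot : Int} (h : mc ≤ tot) :
    pvFillA mc u secs sel tot = (sel, tot) := by
  induction secs generalizing sel with
  | nil => rfl
  | cons kv rest ih =>
    have hstep : pvFillA mc u (kv :: rest) sel tot = pvFillA mc u rest sel tot := by
      simp only [pvFillA, List.foldl_cons]
      congr 1
      have hg : decide (tot < mc) = false := decide_eq_false (not_lt.2 h)
      simp [hg]
    rw [hstep, ih]

theorem pvFill_eq (mc : Int) (u : PySem.Set String) (secs : List (String × String))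
    (sel : List String) (tot : Int) :
    pvFillA mc u secs sel tot = pvFillB mc u secs sel tot := by
  induction secs generalizing sel tot with
  | nil => rfl
  | cons kv rest ih =>
    obtain ⟨k, v⟩ := kv
    cases hcons : PySem.Set.contains u k with
    | true =>
      have hA : pvFillA mc u ((k, v) :: rest) sel tot = pvFillA mc u rest sel tot := by
        simp only [pvFillA, List.foldl_cons]
        congr 1
        have hc' : k ∈ u := by simpa using hcons
        simp [hc']
      have hB : pvFillB mc u ((k, v) :: rest) sel tot = pvFillB mc u rest sel tot := by
        simp only [pvFillB, hcons, if_true]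
      rw [hA, hB, ih]
    | false =>
      by_cases htot : tot < mc
      · have hA : pvFillA mc u ((k, v) :: rest) sel tot =
            pvFillA mc u rest
              (sel ++ ["[" ++ PySem.Str.upper k ++ "]\n" ++ PySem.Str.slice v none (some (mc - tot))])
              (tot + PySem.Str.len (PySem.Str.slice v none (some (mc - tot)))) := by
          simp only [pvFillA, List.foldl_cons]
          congr 1
          have hc' : k ∉ u := by simpa using hcons
          simp [hc', htot]
        have hB : pvFillB mc u ((k, v) :: rest) sel tot =
            pvFillB mc u rest
              (sel ++ ["[" ++ PySem.Str.upper k ++ "]\n" ++ PySem.Str.slice v none (some (mc - tot))])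
              (tot + PySem.Str.len (PySem.Str.slice v none (some (mc - tot)))) := by
          simp only [pvFillB, hcons, Bool.false_eq_true, if_false, if_neg (not_le.2 htot)]
        rw [hA, hB, ih]
      · have hA := pvFillA_stuck (mc := mc) u ((k, v) :: rest) sel (not_lt.1 htot)
        have hB : pvFillB mc u ((k, v) :: rest) sel tot = (sel, tot) := by
          simp only [pvFillB, hcons, Bool.false_eq_true, if_false, if_pos (not_lt.1 htot)]
        rw [hA, hB]

theorem pvInnerA_nomatch {mc : Int} {pk : String} (secs : List (String × String))
    (sel : List String) (tot : Int) (u : PySem.Set String)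
    (hall : ∀ kv ∈ secs, PySem.Str.isIn pk kv.1 = false) :
    pvInnerA mc pk secs sel tot u = ((sel, tot, u), false) := by
  induction secs with
  | nil => rfl
  | cons kv rest ih =>
    obtain ⟨k, v⟩ := kv
    have h0 := hall (k, v) (by simp)
    simp only [pvInnerA, h0, Bool.false_and, Bool.false_eq_true, if_false]
    exact ih fun kv' h' => hall kv' (by simp [h'])

theorem pvOuterA_stop {mc : Int} {sections : List (String × String)} (pk : String)
    (pks : List String) (sel : List String) (tot : Int) (u : PySem.Set String)
    (hall : ∀ kv ∈ sections, PySem.Str.isIn pk kv.1 = false) (h : mc ≤ tot) :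
    pvOuterA mc sections (pk :: pks) sel tot u = (sel, tot, u) := by
  have hI := pvInnerA_nomatch (mc := mc) (pk := pk) sections sel tot u hall
  have hOut : pvOuterA mc sections (pk :: pks) sel tot u =
      (match pvInnerA mc pk sections sel tot u with
       | ((sel', tot', used'), broke) =>
         if broke then (sel', tot', used')
         else if mc ≤ tot' then (sel', tot', used')
         else pvOuterA mc sections pks sel' tot' used') := by
    simp only [pvOuterA]
  rw [hOut, hI]
  simp [h]

-- ===== VERDICT (by name: the statement is the Claim_ definition above) =====
theorem get_key_sections_spec : Claim_equal_get_key_sections := by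
  intro sections mc _hD hPre
  obtain ⟨hN, hrest⟩ := hPre
  unfold Spec_get_key_sections
  by_cases hmc : 0 ≤ mc
  case neg =>
    -- max_chars < 0 (so no key contains 'methods'): both programs select nothing and return ""
    have hm : mc < 0 := by omega
    have hall : ∀ kv ∈ sections, PySem.Str.isIn "methods" kv.1 = false := by
      rcases hrest with h0 | hA
      · omega
      · intro kv hkv
        simpa using List.all_eq_true.1 hA kv hkv
    have hPK : pvPriorityKeys = "methods" :: pvPriorityKeys.tail := rfl
    have hA' : pvOuterA mc sections pvPriorityKeys [] 0 PySem.Set.empty =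
        ([], (0 : Int), PySem.Set.empty) := by
      rw [hPK]
      exact pvOuterA_stop _ _ _ _ _ hall (le_of_lt hm)
    have hB' : pvPassB mc (PySem.List.sorted (pvMatched sections) (fun m => m.1) false)
        [] 0 PySem.Set.empty = ([], (0 : Int), PySem.Set.empty) :=
      pvPassB_stop _ _ _ (le_of_lt hm)
    have hFA := pvFillA_stuck (mc := mc) PySem.Set.empty sections [] (le_of_lt hm)
    have hFB : pvFillB mc PySem.Set.empty sections [] 0 = ([], (0 : Int)) := by
      rw [← pvFill_eq]
      exact hFA
    simp only [get_key_sections, get_key_sections_alt, hA', hB', hFA, hFB]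
  case pos =>
  rcases eq_or_lt_of_le hmc with heq | hpos
  · -- mc = 0: both results are s[:0] = ""
    rcases hA : pvOuterA mc sections pvPriorityKeys [] 0 PySem.Set.empty with ⟨selA, totA, usedA⟩
    rcases hB : pvPassB mc (PySem.List.sorted (pvMatched sections) (fun m => m.1) false)
        [] 0 PySem.Set.empty with ⟨selB, totB, consB⟩
    rcases hFA : pvFillA mc usedA sections selA totA with ⟨sA, tA⟩
    rcases hFB : pvFillB mc consB sections selB totB with ⟨sB, tB⟩
    simp only [get_key_sections, get_key_sections_alt, hA, hB, hFA, hFB]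
    rw [← heq, pv_slice_zero, pv_slice_zero]
  · -- 0 < mc: both phases run the same items in the same order
    have hu0 : ∀ kv ∈ sections, PySem.Set.contains (PySem.Set.empty : PySem.Set String) kv.1 =
        List.any [] (fun p => PySem.Str.isIn p kv.1) := by
      intro kv _
      rfl
    have hout : pvOuterA mc sections pvPriorityKeys [] 0 PySem.Set.empty =
        (pvRunA mc (pvOrd sections 0 14) [] 0 PySem.Set.empty).1 := by
      have h := pvOuterA_eq hN pvPriorityKeys [] [] 0 PySem.Set.empty rfl hpos hu0
      simpa using h
    have hbound : ∀ m ∈ pvMatched sections, (0 : Int) ≤ (fun m => m.1) m ∧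
        (fun m => m.1) m < 0 + (14 : Nat) := by
      intro m hm
      have h2 := pvMatched_bounds hm
      refine ⟨?_, ?_⟩
      · show (0 : Int) ≤ m.1
        omega
      · show m.1 < 0 + ((14 : Nat) : Int)
        push_cast
        omega
    have hsort : PySem.List.sorted (pvMatched sections) (fun m => m.1) false =
        pvOrd sections 0 14 := by
      rw [pv_sorted_tiersF (fun m => m.1) (pvMatched sections) hbound]
      exact pvTiersF_ord sections 14 0
    have hpass := pvPassB_eq (mc := mc) (pvOrd sections 0 14) [] 0 PySem.Set.empty hpos
    rcases hR : (pvRunA mc (pvOrd sections 0 14) [] 0 PySem.Set.empty).1 with ⟨sel, tot, X⟩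
    rcases hF : pvFillB mc X sections sel tot with ⟨s2, t2⟩
    have hFA : pvFillA mc X sections sel tot = (s2, t2) := by
      rw [pvFill_eq]
      exact hF
    simp only [get_key_sections, get_key_sections_alt, hout, hsort, hpass, hR, hFA, hF]
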